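-- pv_equiv track=rewrite | github.com/AAAronB/Ferry | ferry.py | getEmptiestLaneWithCapacity
-- ===== SOURCE A (Python) =====
-- from typing import Dict, List
--
-- def laneLoad(lane: List[Dict[str, int]]) -> int:
--     return sum(vehicle["length"] for vehicle in lane)
--
-- def getEmptiestLaneWithCapacity(carLen, S, c):
--     # Return the index of the emptiest lane with sufficient capacity for the vehicle.
--     # Return -1 if there is no suitable lane
--     emptiestLane = -1
--     emptiestLaneSum = c + 1  # Initialize to capacity + 1
--     for i in range(len(S)):
--         currentSum = laneLoad(S[i])
--         if currentSum + carLen <= c and currentSum < emptiestLaneSum: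
--             emptiestLane = i
--             emptiestLaneSum = currentSum
--     return emptiestLane
-- ===== SOURCE B (Python) =====
-- def laneLoad(lane):
--     return sum(vehicle["length"] for vehicle in lane)
--
-- def getEmptiestLaneWithCapacity(carLen, S, c):
--     # Stage 1: measure every lane once.
--     loads = [laneLoad(lane) for lane in S]
--     # Stage 2: visit the lanes from emptiest to fullest; the first one the car fits in wins.
--     for i in sorted(range(len(S)), key=lambda i: loads[i]):
--         if loads[i] + carLen <= c:
--             return i
--     return -1
-- ===== Notes on version B (the rewrite author's own statement) =====
-- stated objective: alternative
-- what changed: A's single fused filter-and-track-the-minimum loop is replaced by sort-then-scan: measure every lane once, stably sort the lane indices by load, and return the first index in that order whose lane fits the car; Pre_ excludes inputs where some vehicle dict lacks the key "length", on which A raises KeyError.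
-- intended difference: When carLen < 0 and some lane satisfies load + carLen <= c but every such lane has load > c, A returns -1 because its running minimum is initialized to c + 1, which silently rejects lanes that pass its own fit test; B returns the emptiest such lane's index, the intended result of the fit condition load + carLen <= c. — e.g. on getEmptiestLaneWithCapacity(-3, [[[("length", 6)]]], 5): A returns -1, B returns 0
import Mathlib
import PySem

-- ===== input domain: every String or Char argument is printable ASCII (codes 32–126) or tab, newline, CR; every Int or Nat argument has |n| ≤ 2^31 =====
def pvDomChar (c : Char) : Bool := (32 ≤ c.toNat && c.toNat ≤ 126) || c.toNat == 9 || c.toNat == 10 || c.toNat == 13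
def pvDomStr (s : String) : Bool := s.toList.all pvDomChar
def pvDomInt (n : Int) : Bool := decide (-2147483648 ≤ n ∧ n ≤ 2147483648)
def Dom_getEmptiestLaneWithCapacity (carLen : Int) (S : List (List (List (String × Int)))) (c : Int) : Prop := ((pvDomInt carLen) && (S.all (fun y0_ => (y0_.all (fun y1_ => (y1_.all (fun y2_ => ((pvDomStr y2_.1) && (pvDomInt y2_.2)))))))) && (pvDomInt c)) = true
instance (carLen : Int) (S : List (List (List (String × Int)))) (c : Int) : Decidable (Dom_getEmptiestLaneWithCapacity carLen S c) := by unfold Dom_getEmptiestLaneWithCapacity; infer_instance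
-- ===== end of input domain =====

-- B replaces A's fused filter-and-track-minimum loop by sort-then-scan (measure lanes, stable-sort
-- indices by load, first fitting index wins) — objective: alternative; on the D_ corner (negative
-- carLen where every fitting lane is fuller than c) A returns -1 and B returns the fitting lane.


-- ===== PORT A =====
-- laneLoad: sum of vehicle["length"]; Dict.getD 0 is exact under Pre_ (the key is present)
def pvLaneLoad (lane : List (List (String × Int))) : Int :=
  (lane.map (fun vehicle => PySem.Dict.getD ⟨vehicle⟩ "length" 0)).sum

-- literal port of A: one loop over lanes keeping (emptiestLane, emptiestLaneSum)
def getEmptiestLaneWithCapacity (carLen : Int) (S : List (List (List (String × Int)))) (c : Int) : Int :=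
  ((PySem.List.enumerate S).foldl
    (fun (st : Int × Int) e =>
      let currentSum := pvLaneLoad e.2
      if currentSum + carLen ≤ c ∧ currentSum < st.2 then (e.1, currentSum) else st)
    (-1, c + 1)).1

-- ===== PORT B =====
-- Source B's second stage: walk the sorted index list, return the first index whose lane fits
def pvScanFit (carLen c : Int) (loads : List Int) : List Int → Int
  | [] => -1
  | i :: t => if PySem.List.pyGetD loads i 0 + carLen ≤ c then i else pvScanFit carLen c loads t

-- port of Source B: measure every lane once, stable-sort the indices by load, scan for the first fit
def getEmptiestLaneWithCapacity_alt (carLen : Int) (S : List (List (List (String × Int)))) (c : Int) : Int :=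
  let loads := S.map pvLaneLoad
  let order := PySem.List.sorted (PySem.List.pyRange 0 (loads.length : Int) 1)
    (fun i => PySem.List.pyGetD loads i 0)
  pvScanFit carLen c loads order

-- ===== PRECONDITION & SPEC =====
-- Pre_ excludes exactly the inputs where A raises KeyError: some vehicle dict lacks the key "length".
def Pre_getEmptiestLaneWithCapacity (carLen : Int) (S : List (List (List (String × Int)))) (c : Int) : Prop :=
  ∀ lane ∈ S, ∀ vehicle ∈ lane, PySem.Dict.contains (⟨vehicle⟩ : PySem.Dict String Int) "length" = true
instance (carLen : Int) (S : List (List (List (String × Int)))) (c : Int) : Decidable (Pre_getEmptiestLaneWithCapacity carLen S c) := by unfold Pre_getEmptiestLaneWithCapacity; infer_instance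

def pvWitness_getEmptiestLaneWithCapacity : Int × (List (List (List (String × Int)))) × Int :=
  (2, [[[("length", 1)]], []], 5)

-- load of one lane, as D_ needs it: running total of each vehicle's first "length" entry
-- (a boundary relation on the input, stated without the ports' code)
def pvDLaneLoad (lane : List (List (String × Int))) : Int :=
  lane.foldl (fun total v => total + (((v.find? (fun kv => kv.1 == "length")).map (fun kv => kv.2)).getD 0)) 0

-- When carLen < 0 and some lane satisfies load + carLen ≤ c but every such lane has load > c, A
-- returns -1 (its running minimum starts at c + 1, silently rejecting lanes that pass its own fit
-- test); B returns the emptiest such lane's index, the intended result of the fit condition.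
def D_getEmptiestLaneWithCapacity (carLen : Int) (S : List (List (List (String × Int)))) (c : Int) : Prop :=
  carLen < 0 ∧ (∃ lane ∈ S, pvDLaneLoad lane + carLen ≤ c) ∧
    (∀ lane ∈ S, pvDLaneLoad lane + carLen ≤ c → c < pvDLaneLoad lane)
instance (carLen : Int) (S : List (List (List (String × Int)))) (c : Int) : Decidable (D_getEmptiestLaneWithCapacity carLen S c) := by unfold D_getEmptiestLaneWithCapacity; infer_instance

def Spec_getEmptiestLaneWithCapacity (carLen : Int) (S : List (List (List (String × Int)))) (c : Int) (out : Int) : Prop := ¬ D_getEmptiestLaneWithCapacity carLen S c → out = getEmptiestLaneWithCapacity_alt carLen S c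
instance (carLen : Int) (S : List (List (List (String × Int)))) (c : Int) (out : Int) : Decidable (Spec_getEmptiestLaneWithCapacity carLen S c out) := by unfold Spec_getEmptiestLaneWithCapacity; infer_instance

def pvDiffWitness_getEmptiestLaneWithCapacity : Int × (List (List (List (String × Int)))) × Int :=
  (-3, [[[("length", 6)]]], 5)
def pvDiffWitnessOut_getEmptiestLaneWithCapacity : Int × Int := (-1, 0)

-- ===== CLAIM (what is proved, stated in full; the proofs are below) =====
def Claim_unchanged_getEmptiestLaneWithCapacity : Prop := ∀ (carLen : Int) (S : List (List (List (String × Int)))) (c : Int), Dom_getEmptiestLaneWithCapacity carLen S c → Pre_getEmptiestLaneWithCapacity carLen S c → Spec_getEmptiestLaneWithCapacity carLen S c (getEmptiestLaneWithCapacity carLen S c)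
def Claim_changed_getEmptiestLaneWithCapacity : Prop := Dom_getEmptiestLaneWithCapacity (pvDiffWitness_getEmptiestLaneWithCapacity.1) (pvDiffWitness_getEmptiestLaneWithCapacity.2.1) (pvDiffWitness_getEmptiestLaneWithCapacity.2.2) ∧ Pre_getEmptiestLaneWithCapacity (pvDiffWitness_getEmptiestLaneWithCapacity.1) (pvDiffWitness_getEmptiestLaneWithCapacity.2.1) (pvDiffWitness_getEmptiestLaneWithCapacity.2.2) ∧ D_getEmptiestLaneWithCapacity (pvDiffWitness_getEmptiestLaneWithCapacity.1) (pvDiffWitness_getEmptiestLaneWithCapacity.2.1) (pvDiffWitness_getEmptiestLaneWithCapacity.2.2) ∧ getEmptiestLaneWithCapacity (pvDiffWitness_getEmptiestLaneWithCapacity.1) (pvDiffWitness_getEmptiestLaneWithCapacity.2.1) (pvDiffWitness_getEmptiestLaneWithCapacity.2.2) = pvDiffWitnessOut_getEmptiestLaneWithCapacity.1 ∧ getEmptiestLaneWithCapacity_alt (pvDiffWitness_getEmptiestLaneWithCapacity.1) (pvDiffWitness_getEmptiestLaneWithCapacity.2.1) (pvDiffWitness_getEmptiestLaneWithCapacity.2.2)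 = pvDiffWitnessOut_getEmptiestLaneWithCapacity.2 ∧ pvDiffWitnessOut_getEmptiestLaneWithCapacity.1 ≠ pvDiffWitnessOut_getEmptiestLaneWithCapacity.2
def Claim_exact_getEmptiestLaneWithCapacity : Prop := ∀ (carLen : Int) (S : List (List (List (String × Int)))) (c : Int), Dom_getEmptiestLaneWithCapacity carLen S c → Pre_getEmptiestLaneWithCapacity carLen S c → D_getEmptiestLaneWithCapacity carLen S c → getEmptiestLaneWithCapacity carLen S c ≠ getEmptiestLaneWithCapacity_alt carLen S c

-- ===== LEMMAS AND PROOFS =====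

lemma pvFoldAdd {α : Type} (f : α → Int) : ∀ (l : List α) (a : Int),
    l.foldl (fun t v => t + f v) a = a + (l.map f).sum := by
  intro l
  induction l with
  | nil => intro a; simp
  | cons v t ih =>
    intro a
    rw [List.foldl_cons, ih, List.map_cons, List.sum_cons]
    ring

lemma pvDLaneLoad_eq (lane : List (List (String × Int))) : pvDLaneLoad lane = pvLaneLoad lane := by
  unfold pvDLaneLoad pvLaneLoad
  rw [pvFoldAdd]
  simp [PySem.Dict.getD, PySem.Dict.get?]

-- strict lexicographic order on (load, index) pairs, Python's tuple '<'
def pvLexLt (a b : Int × Int) : Prop := a.1 < b.1 ∨ (a.1 = b.1 ∧ a.2 < b.2)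

-- the lex-min fold step on pairs
def pvMinStep (acc : Option (Int × Int)) (x : Int × Int) : Option (Int × Int) :=
  match acc with
  | none => some x
  | some m => if (decide (x.1 < m.1) || (!decide (m.1 < x.1) && decide (x.2 < m.2))) = true then some x else some m

lemma pvMinStep_some_of_lt {m x : Int × Int} (h : pvLexLt x m) :
    pvMinStep (some m) x = some x := by
  simp only [pvLexLt] at h
  simp only [pvMinStep]
  have hb : (decide (x.1 < m.1) || (!decide (m.1 < x.1) && decide (x.2 < m.2))) = true := by
    simp only [Bool.or_eq_true, Bool.and_eq_true, Bool.not_eq_eq_eq_not, Bool.not_true,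
      decide_eq_true_eq, decide_eq_false_iff_not]
    omega
  rw [if_pos hb]

lemma pvMinStep_some_of_not_lt {m x : Int × Int} (h : ¬ pvLexLt x m) :
    pvMinStep (some m) x = some m := by
  simp only [pvLexLt, not_or, not_and] at h
  simp only [pvMinStep]
  have hb : ¬ ((decide (x.1 < m.1) || (!decide (m.1 < x.1) && decide (x.2 < m.2))) = true) := by
    simp only [Bool.or_eq_true, Bool.and_eq_true, Bool.not_eq_eq_eq_not, Bool.not_true,
      decide_eq_true_eq, decide_eq_false_iff_not, not_or, not_and]
    exact ⟨h.1, fun h1 h2 => h.2 (by omega) h2⟩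
  rw [if_neg hb]

-- result of the lex-min fold from a seed: it is an element, and nothing in seed::list beats it
lemma pvMinFold_min : ∀ (L : List (Int × Int)) (m : Int × Int),
    ∃ r, L.foldl pvMinStep (some m) = some r ∧ (r = m ∨ r ∈ L) ∧
      (∀ y, (y = m ∨ y ∈ L) → ¬ pvLexLt y r) := by
  intro L
  induction L with
  | nil =>
    intro m
    refine ⟨m, rfl, Or.inl rfl, ?_⟩
    rintro y (rfl | h)
    · simp only [pvLexLt]; omega
    · simp at h
  | cons x t ih =>
    intro m
    rw [List.foldl_cons]
    by_cases h : pvLexLt x m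
    · rw [pvMinStep_some_of_lt h]
      obtain ⟨r, hr, hmem, hmin⟩ := ih x
      refine ⟨r, hr, ?_, ?_⟩
      · rcases hmem with rfl | hm
        · exact Or.inr (List.mem_cons_self)
        · exact Or.inr (List.mem_cons_of_mem x hm)
      · rintro y (rfl | hy)
        · have hxr := hmin x (Or.inl rfl)
          simp only [pvLexLt] at *
          omega
        · rcases List.mem_cons.mp hy with rfl | hyt
          · exact hmin y (Or.inl rfl)
          · exact hmin y (Or.inr hyt)
    · rw [pvMinStep_some_of_not_lt h]
      obtain ⟨r, hr, hmem, hmin⟩ := ih m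
      refine ⟨r, hr, ?_, ?_⟩
      · rcases hmem with rfl | hm
        · exact Or.inl rfl
        · exact Or.inr (List.mem_cons_of_mem x hm)
      · rintro y (rfl | hy)
        · exact hmin y (Or.inl rfl)
        · rcases List.mem_cons.mp hy with rfl | hyt
          · have hmr := hmin m (Or.inl rfl)
            simp only [pvLexLt] at *
            omega
          · exact hmin y (Or.inr hyt)

-- two minimal members of the same list are equal
lemma pvMin_unique {L : List (Int × Int)} {r r' : Int × Int}
    (h1 : r ∈ L) (h2 : r' ∈ L)
    (m1 : ∀ y ∈ L, ¬ pvLexLt y r) (m2 : ∀ y ∈ L, ¬ pvLexLt y r') : r = r' := by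
  have a := m1 r' h2
  have b := m2 r h1
  simp only [pvLexLt] at a b
  have : r.1 = r'.1 ∧ r.2 = r'.2 := by omega
  exact Prod.ext this.1 this.2

-- selection-by-lex-min
def pvSel (e : Int) (F : List (Int × Int)) : Int :=
  match F.foldl pvMinStep none with
  | none => e
  | some r => r.2

-- the key step: picking lane p and continuing with threshold p.1 over the strictly-better
-- candidates F' selects the same index as the lex-min over p together with all candidates F
lemma pvSel_key (p : Int × Int) (F F' : List (Int × Int)) (e : Int)
    (hsub : ∀ y ∈ F', y ∈ F)
    (hlt : ∀ y ∈ F', y.1 < p.1)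
    (hcomp : ∀ y ∈ F, y.1 < p.1 → y ∈ F')
    (hidx : ∀ y ∈ F, p.2 < y.2) :
    pvSel e (p :: F) = pvSel p.2 F' := by
  obtain ⟨r, hr, hrmem, hrmin⟩ := pvMinFold_min F p
  have hLHS : pvSel e (p :: F) = r.2 := by
    simp only [pvSel, List.foldl_cons]
    have h0 : pvMinStep none p = some p := rfl
    rw [h0, hr]
  rw [hLHS]
  have hrmem' : r ∈ p :: F := by
    rcases hrmem with rfl | h
    · exact List.mem_cons_self
    · exact List.mem_cons_of_mem p h
  have hrmin' : ∀ y ∈ p :: F, ¬ pvLexLt y r := by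
    intro y hy
    rcases List.mem_cons.mp hy with rfl | hy'
    · exact hrmin y (Or.inl rfl)
    · exact hrmin y (Or.inr hy')
  cases hF' : F' with
  | nil =>
    have hrp : r = p := by
      refine pvMin_unique hrmem' List.mem_cons_self hrmin' ?_
      intro y hy
      rcases List.mem_cons.mp hy with rfl | hy'
      · simp only [pvLexLt]; omega
      · have hnin : y ∉ F' := by rw [hF']; simp
        have h1 : ¬ y.1 < p.1 := fun hcon => hnin (hcomp y hy' hcon)
        have h2 := hidx y hy'
        simp only [pvLexLt]
        omega
    simp [pvSel, hrp]
  | cons x xs =>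
    obtain ⟨r', hr', hrmem2, hrmin2⟩ := pvMinFold_min xs x
    have hRHS : pvSel p.2 (x :: xs) = r'.2 := by
      simp only [pvSel, List.foldl_cons]
      have h0 : pvMinStep none x = some x := rfl
      rw [h0, hr']
    rw [hRHS]
    have hr'F' : r' ∈ F' := by
      rw [hF']
      rcases hrmem2 with rfl | h
      · exact List.mem_cons_self
      · exact List.mem_cons_of_mem x h
    have hr'min : ∀ y ∈ F', ¬ pvLexLt y r' := by
      intro y hy
      rw [hF'] at hy
      rcases List.mem_cons.mp hy with rfl | hy'
      · exact hrmin2 y (Or.inl rfl)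
      · exact hrmin2 y (Or.inr hy')
    have hr'F : r' ∈ p :: F := List.mem_cons_of_mem p (hsub r' hr'F')
    have hr'minF : ∀ y ∈ p :: F, ¬ pvLexLt y r' := by
      intro y hy
      have hr'p : r'.1 < p.1 := hlt r' hr'F'
      rcases List.mem_cons.mp hy with rfl | hy'
      · simp only [pvLexLt]; omega
      · intro hltc
        have hy1 : y.1 < p.1 := by
          simp only [pvLexLt] at hltc; omega
        exact hr'min y (hcomp y hy' hy1) hltc
    have : r = r' := pvMin_unique hrmem' hr'F hrmin' hr'minF
    rw [this]

-- A's loop over precomputed (load, index) pairs computes pvSel of the filtered list,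
-- provided indices are strictly increasing (the tie-break argument)
lemma pvFoldA_char (carLen c : Int) : ∀ (L : List (Int × Int)) (e s : Int),
    L.Pairwise (fun a b => a.2 < b.2) →
    (L.foldl (fun st p => if p.1 + carLen ≤ c ∧ p.1 < st.2 then (p.2, p.1) else st) (e, s)).1
      = pvSel e (L.filter (fun p => decide (p.1 + carLen ≤ c ∧ p.1 < s))) := by
  intro L
  induction L with
  | nil => intro e s _; rfl
  | cons p t ih =>
    intro e s hpw
    have hidx := (List.pairwise_cons.mp hpw).1
    have hpw' := (List.pairwise_cons.mp hpw).2
    rw [List.foldl_cons, List.filter_cons]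
    by_cases hc : p.1 + carLen ≤ c ∧ p.1 < s
    · rw [if_pos hc, if_pos (by simpa using hc)]
      rw [ih p.2 p.1 hpw']
      refine (pvSel_key p _ _ e ?_ ?_ ?_ ?_).symm
      · intro y hy
        rw [List.mem_filter] at hy ⊢
        refine ⟨hy.1, ?_⟩
        have := of_decide_eq_true hy.2
        exact decide_eq_true (by omega)
      · intro y hy
        rw [List.mem_filter] at hy
        exact (of_decide_eq_true hy.2).2
      · intro y hy h1
        rw [List.mem_filter] at hy ⊢
        refine ⟨hy.1, ?_⟩
        have := of_decide_eq_true hy.2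
        exact decide_eq_true ⟨this.1, h1⟩
      · intro y hy
        rw [List.mem_filter] at hy
        exact hidx y hy.1
    · rw [if_neg hc, if_neg (by simpa using hc)]
      exact ih e s hpw'

-- the candidate pairs (load, index), B's key and B's index list (proof-side abbreviations)
def pvP (S : List (List (List (String × Int)))) : List (Int × Int) :=
  (PySem.List.enumerate S).map (fun e => (pvLaneLoad e.2, e.1))
def pvKey (S : List (List (List (String × Int)))) (i : Int) : Int :=
  PySem.List.pyGetD (S.map pvLaneLoad) i 0
def pvR (S : List (List (List (String × Int)))) : List Int :=
  PySem.List.pyRange 0 ((S.map pvLaneLoad).length : Int) 1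

-- A equals pvSel of the filter of the candidate pairs
lemma pvA_char (carLen : Int) (S : List (List (List (String × Int)))) (c : Int) :
    getEmptiestLaneWithCapacity carLen S c
      = pvSel (-1) ((pvP S).filter (fun p => decide (p.1 + carLen ≤ c ∧ p.1 < c + 1))) := by
  unfold getEmptiestLaneWithCapacity
  have hmap : (PySem.List.enumerate S).foldl
      (fun (st : Int × Int) e =>
        let currentSum := pvLaneLoad e.2
        if currentSum + carLen ≤ c ∧ currentSum < st.2 then (e.1, currentSum) else st)
      (-1, c + 1)
      = (pvP S).foldl
          (fun st p => if p.1 + carLen ≤ c ∧ p.1 < st.2 then (p.2, p.1) else st) (-1, c + 1) := by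
    unfold pvP
    rw [List.foldl_map]
  rw [hmap]
  rw [pvFoldA_char carLen c _ (-1) (c + 1) (by
    unfold pvP
    rw [List.pairwise_map]
    exact PySem.List.pairwise_lt_enumerate S 0)]

lemma pvR_eq_map_fst (S : List (List (List (String × Int)))) :
    pvR S = (PySem.List.enumerate S).map (fun e => e.1) := by
  unfold pvR
  rw [PySem.List.map_fst_enumerate]
  simp

lemma pvR_pairwise (S : List (List (List (String × Int)))) : (pvR S).Pairwise (· < ·) := by
  rw [pvR_eq_map_fst, List.pairwise_map]
  exact PySem.List.pairwise_lt_enumerate S 0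

lemma pvKey_at (S : List (List (List (String × Int)))) (k : Nat) (hk : k < S.length) :
    pvKey S (k : Int) = pvLaneLoad (S[k]) := by
  unfold pvKey
  rw [PySem.List.pyGetD_natCast]
  rw [List.getD_eq_getElem _ _ (by simpa using hk)]
  simp

lemma pvMem_R (S : List (List (List (String × Int)))) (i : Int) :
    i ∈ pvR S ↔ ∃ (k : Nat) (hk : k < S.length), i = (k : Int) := by
  rw [pvR_eq_map_fst]
  constructor
  · intro h
    obtain ⟨e, he, rfl⟩ := List.mem_map.mp h
    obtain ⟨k, hk, rfl⟩ := (PySem.List.mem_enumerate_iff _ _ _).mp he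
    exact ⟨k, hk, by simp⟩
  · rintro ⟨k, hk, rfl⟩
    exact List.mem_map.mpr ⟨((k : Int), S[k]), (PySem.List.mem_enumerate_iff _ _ _).mpr ⟨k, hk, by simp⟩, rfl⟩

lemma pvP_eq (S : List (List (List (String × Int)))) :
    pvP S = (pvR S).map (fun i => (pvKey S i, i)) := by
  rw [pvR_eq_map_fst]
  unfold pvP
  rw [List.map_map]
  apply List.map_congr_left
  intro e he
  obtain ⟨k, hk, rfl⟩ := (PySem.List.mem_enumerate_iff _ _ _).mp he
  simp [Function.comp, pvKey_at S k hk]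

-- the min?-style fold step for B's key
def pvMinKStep (key : Int → Int) (o : Option Int) (x : Int) : Option Int :=
  match o with
  | none => some x
  | some m => if key x < key m then some x else some m

-- head of insertBy
lemma pvHead_insertBy {α : Type} (before : α → α → Bool) (x : α) (acc : List α) :
    (PySem.List.insertBy before x acc).head? =
      match acc.head? with
      | none => some x
      | some y => if before x y then some x else some y := by
  cases acc with
  | nil => rfl
  | cons y ys =>
    show (if before x y then x :: y :: ys else y :: PySem.List.insertBy before x ys).head? = _
    by_cases h : before x y <;> simp [h]

-- head of the insertion-sort fold is the first-minimum fold
lemma pvHead_foldl_insertBy (key : Int → Int) :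
    ∀ (xs acc : List Int),
      (xs.foldl (fun a x => PySem.List.insertBy (fun a b => decide (key a < key b)) x a) acc).head?
        = xs.foldl (pvMinKStep key) acc.head? := by
  intro xs
  induction xs with
  | nil => intro acc; rfl
  | cons x t ih =>
    intro acc
    rw [List.foldl_cons, ih, List.foldl_cons]
    congr 1
    rw [pvHead_insertBy]
    cases acc.head? with
    | none => rfl
    | some y =>
      simp only [pvMinKStep]
      by_cases h : key x < key y <;> simp [h]

-- on a strictly increasing list, the first-minimum fold computes the lex-minimum of (key i, i)
lemma pvMinKFold_min (key : Int → Int) : ∀ (t : List Int) (m : Int),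
    (∀ x ∈ t, m < x) → t.Pairwise (· < ·) →
    ∃ r, t.foldl (pvMinKStep key) (some m) = some r ∧ (r = m ∨ r ∈ t) ∧
      (∀ y, (y = m ∨ y ∈ t) → ¬ pvLexLt (key y, y) (key r, r)) := by
  intro t
  induction t with
  | nil =>
    intro m _ _
    refine ⟨m, rfl, Or.inl rfl, ?_⟩
    rintro y (rfl | h)
    · simp [pvLexLt]
    · simp at h
  | cons x t ih =>
    intro m hgt hpw
    have hxt : ∀ y ∈ t, x < y := (List.pairwise_cons.mp hpw).1
    have hpw' := (List.pairwise_cons.mp hpw).2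
    have hmx : m < x := hgt x List.mem_cons_self
    rw [List.foldl_cons]
    by_cases h : key x < key m
    · have hstep : pvMinKStep key (some m) x = some x := by simp [pvMinKStep, h]
      rw [hstep]
      obtain ⟨r, hr, hmem, hmin⟩ := ih x hxt hpw'
      refine ⟨r, hr, ?_, ?_⟩
      · rcases hmem with rfl | hm
        · exact Or.inr List.mem_cons_self
        · exact Or.inr (List.mem_cons_of_mem x hm)
      · rintro y (rfl | hy)
        · have hxr := hmin x (Or.inl rfl)
          simp only [pvLexLt] at *
          omega
        · rcases List.mem_cons.mp hy with rfl | hyt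
          · exact hmin y (Or.inl rfl)
          · exact hmin y (Or.inr hyt)
    · have hstep : pvMinKStep key (some m) x = some m := by simp [pvMinKStep, h]
      rw [hstep]
      obtain ⟨r, hr, hmem, hmin⟩ := ih m (fun y hy => lt_trans hmx (hxt y hy)) hpw'
      refine ⟨r, hr, ?_, ?_⟩
      · rcases hmem with rfl | hm
        · exact Or.inl rfl
        · exact Or.inr (List.mem_cons_of_mem x hm)
      · rintro y (rfl | hy)
        · exact hmin y (Or.inl rfl)
        · intro hcon
          rcases List.mem_cons.mp hy with heq | hyt
          · -- y = x: key m ≤ key x and (r = m with m < x, or r ∈ t with x < r)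
            have hmr := hmin m (Or.inl rfl)
            rcases hmem with rfl | hrt
            · rw [heq] at hcon
              simp only [pvLexLt] at hcon hmr
              omega
            · have hxr : x < r := hxt r hrt
              rw [heq] at hcon
              simp only [pvLexLt] at hcon hmr
              omega
          · exact hmin y (Or.inr hyt) hcon

-- the scan returns -1 when nothing fits
lemma pvScanFit_unfit (carLen c : Int) (loads : List Int) :
    ∀ l, (∀ i ∈ l, ¬ (PySem.List.pyGetD loads i 0 + carLen ≤ c)) → pvScanFit carLen c loads l = -1 := by
  intro l
  induction l with
  | nil => intro _; rfl
  | cons i t ih =>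
    intro h
    unfold pvScanFit
    rw [if_neg (h i List.mem_cons_self)]
    exact ih (fun j hj => h j (List.mem_cons_of_mem i hj))

-- B's characterization: on a nonempty S it returns the first index of minimal load if that lane
-- fits, else -1
lemma pvB_char (carLen : Int) (S : List (List (List (String × Int)))) (c : Int) (hS : S ≠ []) :
    ∃ r0, r0 ∈ pvR S ∧ (∀ y ∈ pvR S, ¬ pvLexLt (pvKey S y, y) (pvKey S r0, r0)) ∧
      getEmptiestLaneWithCapacity_alt carLen S c
        = if pvKey S r0 + carLen ≤ c then r0 else -1 := by
  have hlen : 0 < S.length := List.length_pos_iff.mpr hS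
  have hRcons : pvR S = 0 :: PySem.List.pyRange 1 ((S.map pvLaneLoad).length : Int) 1 := by
    unfold pvR
    rw [PySem.List.pyRange_one_cons (by simp; omega)]
    norm_num
  have hpw := pvR_pairwise S
  rw [hRcons] at hpw
  have hgt := (List.pairwise_cons.mp hpw).1
  have hpw' := (List.pairwise_cons.mp hpw).2
  obtain ⟨r0, hr0, hmem, hmin⟩ :=
    pvMinKFold_min (pvKey S) (PySem.List.pyRange 1 ((S.map pvLaneLoad).length : Int) 1) 0 hgt hpw'
  have horder : (PySem.List.sorted (pvR S) (pvKey S)).head? = some r0 := by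
    rw [PySem.List.sorted_eq_foldl_insertBy, pvHead_foldl_insertBy, hRcons]
    rw [List.foldl_cons]
    exact hr0
  obtain ⟨rest, hrest⟩ : ∃ rest, PySem.List.sorted (pvR S) (pvKey S) = r0 :: rest := by
    cases h : PySem.List.sorted (pvR S) (pvKey S) with
    | nil => rw [h] at horder; simp at horder
    | cons a t => rw [h] at horder; simp at horder; exact ⟨t, by rw [horder]⟩
  have hhead := PySem.List.key_head_sorted_le (pvR S) (pvKey S) hrest
  refine ⟨r0, ?_, ?_, ?_⟩
  · rw [hRcons]
    rcases hmem with rfl | hm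
    · exact List.mem_cons_self
    · exact List.mem_cons_of_mem 0 hm
  · intro y hy
    rw [hRcons] at hy
    rcases List.mem_cons.mp hy with rfl | hyt
    · exact hmin _ (Or.inl rfl)
    · exact hmin y (Or.inr hyt)
  · show pvScanFit carLen c (S.map pvLaneLoad) (PySem.List.sorted (pvR S) (pvKey S))
      = if pvKey S r0 + carLen ≤ c then r0 else -1
    rw [hrest]
    unfold pvScanFit
    by_cases hfit : pvKey S r0 + carLen ≤ c
    · rw [if_pos hfit, if_pos (by exact hfit)]
    · rw [if_neg hfit, if_neg (by exact hfit)]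
      apply pvScanFit_unfit
      intro i hi
      have hiR : i ∈ pvR S := by
        refine (PySem.List.mem_sorted (pvR S) (pvKey S) false i).mp ?_
        rw [hrest]
        exact List.mem_cons_of_mem r0 hi
      have := hhead i hiR
      show ¬ (pvKey S i + carLen ≤ c)
      omega

-- ¬D_ in terms of the candidate pairs: if some lane fits, some fitting lane also has load ≤ c
lemma pvNotD_fit (carLen : Int) (S : List (List (List (String × Int)))) (c : Int)
    (hnD : ¬ D_getEmptiestLaneWithCapacity carLen S c)
    (p : Int × Int) (hp : p ∈ pvP S) (hfit : p.1 + carLen ≤ c) :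
    ∃ q ∈ pvP S, q.1 + carLen ≤ c ∧ q.1 ≤ c := by
  by_cases hneg : carLen < 0
  · unfold D_getEmptiestLaneWithCapacity at hnD
    push_neg at hnD
    obtain ⟨e, he, rfl⟩ := List.mem_map.mp hp
    obtain ⟨k, hk, rfl⟩ := (PySem.List.mem_enumerate_iff _ _ _).mp he
    have hlane : (S[k]) ∈ S := List.getElem_mem hk
    obtain ⟨lane, hlmem, hlfit, hlle⟩ := hnD hneg ⟨S[k], hlane, by rw [pvDLaneLoad_eq]; exact hfit⟩
    rw [pvDLaneLoad_eq] at hlfit hlle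
    obtain ⟨j, hj, rfl⟩ := List.mem_iff_getElem.mp hlmem
    refine ⟨(pvLaneLoad (S[j]), (j : Int)), ?_, hlfit, by omega⟩
    exact List.mem_map.mpr ⟨((j : Int), S[j]), (PySem.List.mem_enumerate_iff _ _ _).mpr ⟨j, hj, by simp⟩, rfl⟩
  · exact ⟨p, hp, hfit, by omega⟩

-- shared core: outside D_, A = B
lemma pvMain (carLen : Int) (S : List (List (List (String × Int)))) (c : Int)
    (hnD : ¬ D_getEmptiestLaneWithCapacity carLen S c) :
    getEmptiestLaneWithCapacity carLen S c = getEmptiestLaneWithCapacity_alt carLen S c := by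
  cases hS : S with
  | nil =>
    subst hS
    rfl
  | cons s0 St =>
    rw [← hS]
    have hSne : S ≠ [] := by rw [hS]; simp
    obtain ⟨r0, hr0R, hr0min, hB⟩ := pvB_char carLen S c hSne
    have hr0P : (pvKey S r0, r0) ∈ pvP S := by
      rw [pvP_eq]
      exact List.mem_map.mpr ⟨r0, hr0R, rfl⟩
    have hminP : ∀ q ∈ pvP S, ¬ pvLexLt q (pvKey S r0, r0) := by
      intro q hq
      rw [pvP_eq] at hq
      obtain ⟨y, hy, rfl⟩ := List.mem_map.mp hq
      exact hr0min y hy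
    rw [pvA_char, hB]
    by_cases hfit : pvKey S r0 + carLen ≤ c
    · rw [if_pos hfit]
      obtain ⟨q, hqP, hqfit, hqle⟩ := pvNotD_fit carLen S c hnD _ hr0P hfit
      have hr0le : pvKey S r0 ≤ c := by
        have := hminP q hqP
        simp only [pvLexLt] at this
        omega
      have hr0F : (pvKey S r0, r0) ∈ (pvP S).filter (fun p => decide (p.1 + carLen ≤ c ∧ p.1 < c + 1)) :=
        List.mem_filter.mpr ⟨hr0P, decide_eq_true ⟨hfit, by omega⟩⟩
      obtain ⟨f0, ft, hF⟩ : ∃ f0 ft,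
          (pvP S).filter (fun p => decide (p.1 + carLen ≤ c ∧ p.1 < c + 1)) = f0 :: ft := by
        cases h : (pvP S).filter (fun p => decide (p.1 + carLen ≤ c ∧ p.1 < c + 1)) with
        | nil => rw [h] at hr0F; simp at hr0F
        | cons a t => exact ⟨a, t, rfl⟩
      obtain ⟨r', hr', hmem', hmin'⟩ := pvMinFold_min ft f0
      have hsel : pvSel (-1) (f0 :: ft) = r'.2 := by
        simp only [pvSel, List.foldl_cons]
        have h0 : pvMinStep none f0 = some f0 := rfl
        rw [h0, hr']
      have hr'F : r' ∈ f0 :: ft := by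
        rcases hmem' with rfl | h
        · exact List.mem_cons_self
        · exact List.mem_cons_of_mem f0 h
      have hmin'' : ∀ y ∈ f0 :: ft, ¬ pvLexLt y r' := by
        intro y hy
        rcases List.mem_cons.mp hy with rfl | hy'
        · exact hmin' y (Or.inl rfl)
        · exact hmin' y (Or.inr hy')
      have hminF : ∀ y ∈ f0 :: ft, ¬ pvLexLt y (pvKey S r0, r0) := by
        intro y hy
        rw [← hF] at hy
        exact hminP y (List.mem_filter.mp hy).1
      have : r' = (pvKey S r0, r0) :=
        pvMin_unique hr'F (by rw [hF] at hr0F; exact hr0F) hmin'' hminF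
      rw [hF, hsel, this]
    · rw [if_neg hfit]
      have hFnil : (pvP S).filter (fun p => decide (p.1 + carLen ≤ c ∧ p.1 < c + 1)) = [] := by
        rw [List.filter_eq_nil_iff]
        intro p hp hdec
        have hd := of_decide_eq_true hdec
        have := hminP p hp
        simp only [pvLexLt] at this
        omega
      rw [hFnil]
      rfl

-- ===== VERDICT (by name: the statements are the Claim_ definitions above) =====
theorem getEmptiestLaneWithCapacity_spec : Claim_unchanged_getEmptiestLaneWithCapacity := by
  intro carLen S c _ _
  unfold Spec_getEmptiestLaneWithCapacity
  intro hnD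
  exact pvMain carLen S c hnD

theorem getEmptiestLaneWithCapacity_changed : Claim_changed_getEmptiestLaneWithCapacity := by
  unfold Claim_changed_getEmptiestLaneWithCapacity; decide

theorem getEmptiestLaneWithCapacity_tight : Claim_exact_getEmptiestLaneWithCapacity := by
  intro carLen S c _ _ hD
  obtain ⟨hneg, ⟨lane, hlmem, hlfit⟩, hall⟩ := hD
  rw [pvDLaneLoad_eq] at hlfit
  obtain ⟨j, hj, rfl⟩ := List.mem_iff_getElem.mp hlmem
  have hSne : S ≠ [] := by intro h; subst h; simp at hj
  have hA : getEmptiestLaneWithCapacity carLen S c = -1 := by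
    rw [pvA_char]
    have hFnil : (pvP S).filter (fun p => decide (p.1 + carLen ≤ c ∧ p.1 < c + 1)) = [] := by
      rw [List.filter_eq_nil_iff]
      intro p hp hdec
      have hd := of_decide_eq_true hdec
      obtain ⟨e, he, rfl⟩ := List.mem_map.mp hp
      obtain ⟨k, hk, rfl⟩ := (PySem.List.mem_enumerate_iff _ _ _).mp he
      have := hall (S[k]) (List.getElem_mem hk) (by rw [pvDLaneLoad_eq]; exact hd.1)
      rw [pvDLaneLoad_eq] at this
      simp only at hd
      omega
    rw [hFnil]
    rfl
  obtain ⟨r0, hr0R, hr0min, hB⟩ := pvB_char carLen S c hSne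
  have hjP : (pvLaneLoad (S[j]), (j : Int)) ∈ pvP S :=
    List.mem_map.mpr ⟨((j : Int), S[j]), (PySem.List.mem_enumerate_iff _ _ _).mpr ⟨j, hj, by simp⟩, rfl⟩
  have hminP : ∀ q ∈ pvP S, ¬ pvLexLt q (pvKey S r0, r0) := by
    intro q hq
    rw [pvP_eq] at hq
    obtain ⟨y, hy, rfl⟩ := List.mem_map.mp hq
    exact hr0min y hy
  have hfit : pvKey S r0 + carLen ≤ c := by
    have := hminP _ hjP
    simp only [pvLexLt] at this
    omega
  have hr0nn : 0 ≤ r0 := by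
    obtain ⟨k, hk, rfl⟩ := (pvMem_R S r0).mp hr0R
    positivity
  rw [hA, hB, if_pos hfit]
  omega
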